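-- pv_equiv track=rewrite | github.com/EgecanCogulu/TDIChallange2 | Section3/TDI Laser.py | calculateV
-- ===== SOURCE A (Python) =====
-- def calculateV(mylist):
--     length=len(mylist)
--     V=0
--     for (index,element) in enumerate(mylist):
--         for j in range(index+1):
--             if index-j==0:
--                 V+=1
--                 break
--             if mylist[index]>mylist[index-j-1]:
--                 V+=1
--                 continue
--             else:
--                 V+=1
--                 break
--     return (V)
-- ===== SOURCE B (Python) =====
-- def calculateV(mylist):
--     # Monotonic stack: for each index, distance back to nearest previous element >= current
--     total = 0
--     stack = []  # indices with strictly decreasing "visibility"; values non-increasing after pops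
--     for i, x in enumerate(mylist):
--         while stack and mylist[stack[-1]] < x:
--             stack.pop()
--         total += (i - stack[-1]) if stack else (i + 1)
--         stack.append(i)
--     return total
-- ===== Notes on version B (the rewrite author's own statement) =====
-- stated objective: faster
-- what changed: Replaced the quadratic backward scan per index by a single pass with a monotonic stack of indices (stock-span algorithm): each index's distance to the nearest previous >= element is obtained by popping smaller stack tops.
import Mathlib
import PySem

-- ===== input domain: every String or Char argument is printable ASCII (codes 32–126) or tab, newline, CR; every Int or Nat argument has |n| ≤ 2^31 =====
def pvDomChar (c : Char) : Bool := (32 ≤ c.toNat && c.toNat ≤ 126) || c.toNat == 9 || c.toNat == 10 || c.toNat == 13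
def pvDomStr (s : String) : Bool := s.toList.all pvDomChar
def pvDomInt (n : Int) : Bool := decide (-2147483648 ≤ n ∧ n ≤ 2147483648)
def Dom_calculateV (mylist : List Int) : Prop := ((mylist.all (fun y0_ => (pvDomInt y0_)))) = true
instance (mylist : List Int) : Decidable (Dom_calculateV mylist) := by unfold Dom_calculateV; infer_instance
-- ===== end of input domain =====

-- B replaces A's quadratic per-index backward scan by a single-pass monotonic stack (stock span): asymptotically faster.


-- ===== PORT A =====
-- inner 'for j in range(index+1)' loop: each iteration adds 1 to V; 'break' stops, 'continue' recurses
def pvInnerA (mylist : List Int) (index : Int) : List Int → Int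
  | [] => 0
  | j :: rest =>
    if index - j = 0 then 1
    else if PySem.List.pyGetD mylist index 0 > PySem.List.pyGetD mylist (index - j - 1) 0 then
      1 + pvInnerA mylist index rest
    else 1

def calculateV (mylist : List Int) : Int :=
  (PySem.List.enumerate mylist 0).foldl
    (fun V p => V + pvInnerA mylist p.1 (PySem.List.pyRange 0 (p.1 + 1) 1)) 0

-- ===== PORT B =====
-- 'while stack and mylist[stack[-1]] < x: stack.pop()' — the stack is kept top-first (head = Python's stack[-1])
def pvPopWhile (mylist : List Int) (x : Int) : List Int → List Int
  | [] => []
  | t :: rest => if PySem.List.pyGetD mylist t 0 < x then pvPopWhile mylist x rest else t :: rest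

def calculateV_alt (mylist : List Int) : Int :=
  ((PySem.List.enumerate mylist 0).foldl
    (fun (st : Int × List Int) p =>
      let s := pvPopWhile mylist p.2 st.2
      (st.1 + (match s with | [] => p.1 + 1 | t :: _ => p.1 - t), p.1 :: s))
    ((0 : Int), ([] : List Int))).1

-- ===== PRECONDITION & SPEC =====
def Spec_calculateV (mylist : List Int) (out : Int) : Prop := out = calculateV_alt mylist
instance (mylist : List Int) (out : Int) : Decidable (Spec_calculateV mylist out) := by unfold Spec_calculateV; infer_instance

-- ===== CLAIM (what is proved, stated in full; the proofs are below) =====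
def Claim_equal_calculateV : Prop := ∀ (mylist : List Int), Dom_calculateV mylist → Spec_calculateV mylist (calculateV mylist)

-- ===== LEMMAS AND PROOFS =====

-- span of x against the reversed prefix: consecutive strictly-smaller elements
def pvSpanAux (x : Int) : List Int → Int
  | [] => 0
  | y :: rest => if y < x then 1 + pvSpanAux x rest else 0

-- reference value: sum of (span + 1) over the remaining list, given the reversed prefix
def pvSumSpans : List Int → List Int → Int
  | _, [] => 0
  | rev, x :: rest => (pvSpanAux x rev + 1) + pvSumSpans (x :: rev) rest

lemma pvPop_pop (mylist : List Int) (y x : Int) (h : y ≤ x) :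
    ∀ S : List Int, pvPopWhile mylist x (pvPopWhile mylist y S) = pvPopWhile mylist x S := by
  intro S
  induction S with
  | nil => rfl
  | cons t rest ih =>
    by_cases hy : PySem.List.pyGetD mylist t 0 < y
    · simp [pvPopWhile, hy, lt_of_lt_of_le hy h, ih]
    · simp [pvPopWhile, hy]

lemma pvDrop_getElem? {mylist rest : List Int} {x : Int} {s : Nat}
    (h : mylist.drop s = x :: rest) : mylist[s]? = some x := by
  have h0 : (mylist.drop s)[0]? = mylist[s + 0]? := List.getElem?_drop
  simpa [h] using h0.symm

lemma pvRevtake_drop (mylist : List Int) (s j : Nat) (hs : s ≤ mylist.length) (hj : j < s) :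
    ((mylist.take s).reverse).drop j
      = mylist.getD (s - 1 - j) 0 :: ((mylist.take s).reverse).drop (j + 1) := by
  have hlen : ((mylist.take s).reverse).length = s := by
    simp [Nat.min_eq_left hs]
  have hj' : j < ((mylist.take s).reverse).length := by omega
  rw [List.drop_eq_getElem_cons hj']
  have hlt : s - 1 - j < mylist.length := by omega
  have hhead : ((mylist.take s).reverse)[j] = mylist[s - 1 - j] := by
    rw [List.getElem_reverse, List.getElem_take]
    congr 1
    simp [Nat.min_eq_left hs]
  rw [hhead, List.getD_eq_getElem?_getD, List.getElem?_eq_getElem hlt]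
  rfl

lemma pvInnerA_eq (mylist : List Int) (s : Nat) (hs : s < mylist.length) :
    ∀ (n j : Nat), j + n = s →
      pvInnerA mylist (s : Int) (PySem.List.pyRange (j : Int) ((s : Int) + 1) 1)
        = pvSpanAux (mylist.getD s 0) (((mylist.take s).reverse).drop j) + 1 := by
  intro n
  induction n with
  | zero =>
    intro j hj
    have hjs : j = s := by omega
    subst hjs
    rw [PySem.List.pyRange_one_singleton]
    have hdrop : ((mylist.take j).reverse).drop j = [] := by
      apply List.drop_eq_nil_of_le
      simp [Nat.min_eq_left (le_of_lt hs)]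
    simp [pvInnerA, hdrop, pvSpanAux]
  | succ n ih =>
    intro j hj
    have hjs : j < s := by omega
    have hcons : PySem.List.pyRange (j : Int) ((s : Int) + 1) 1
        = (j : Int) :: PySem.List.pyRange ((j : Int) + 1) ((s : Int) + 1) 1 := by
      apply PySem.List.pyRange_one_cons
      omega
    rw [hcons]
    have hne : ¬ ((s : Int) - (j : Int) = 0) := by omega
    have hidx : (s : Int) - (j : Int) - 1 = ((s - 1 - j : Nat) : Int) := by omega
    have hgs : PySem.List.pyGetD mylist (s : Int) 0 = mylist.getD s 0 := by
      exact_mod_cast PySem.List.pyGetD_natCast mylist s 0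
    have hgp : PySem.List.pyGetD mylist ((s : Int) - (j : Int) - 1) 0
        = mylist.getD (s - 1 - j) 0 := by
      rw [hidx]; exact_mod_cast PySem.List.pyGetD_natCast mylist (s - 1 - j) 0
    have hrev := pvRevtake_drop mylist s j (le_of_lt hs) hjs
    have ihj : (j + 1) + n = s := by omega
    by_cases hc : mylist.getD (s - 1 - j) 0 < mylist.getD s 0
    · have : pvInnerA mylist (s : Int)
          ((j : Int) :: PySem.List.pyRange ((j : Int) + 1) ((s : Int) + 1) 1)
          = 1 + pvInnerA mylist (s : Int)
              (PySem.List.pyRange ((j : Int) + 1) ((s : Int) + 1) 1) := by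
        simp only [pvInnerA, hne, if_false, hgs, hgp]
        rw [if_pos hc]
      rw [this]
      have hcast : ((j : Int) + 1) = (((j + 1 : Nat)) : Int) := by push_cast; ring
      rw [hcast, ih (j + 1) ihj, hrev]
      simp only [pvSpanAux, if_pos hc]
      ring
    · have : pvInnerA mylist (s : Int)
          ((j : Int) :: PySem.List.pyRange ((j : Int) + 1) ((s : Int) + 1) 1) = 1 := by
        simp only [pvInnerA, hne, if_false, hgs, hgp]
        rw [if_neg hc]
      rw [this, hrev]
      simp only [pvSpanAux, if_neg hc]
      norm_num

lemma pvTake_succ_reverse {mylist rest : List Int} {x : Int} {s : Nat}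
    (h : mylist.drop s = x :: rest) :
    (mylist.take (s + 1)).reverse = x :: (mylist.take s).reverse := by
  have hx : mylist[s]? = some x := pvDrop_getElem? h
  rw [List.take_add_one, hx]
  simp

lemma pvDrop_succ {mylist rest : List Int} {x : Int} {s : Nat}
    (h : mylist.drop s = x :: rest) : mylist.drop (s + 1) = rest := by
  rw [← List.drop_drop, h]
  rfl

lemma pvLoopA (mylist : List Int) :
    ∀ (rest : List Int) (s : Nat) (total : Int), mylist.drop s = rest →
      (PySem.List.enumerate rest (s : Int)).foldl
          (fun V p => V + pvInnerA mylist p.1 (PySem.List.pyRange 0 (p.1 + 1) 1)) total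
        = total + pvSumSpans ((mylist.take s).reverse) rest := by
  intro rest
  induction rest with
  | nil => intro s total h; simp [PySem.List.enumerate, pvSumSpans]
  | cons x rest' ih =>
    intro s total h
    have hs : s < mylist.length := by
      by_contra hc
      rw [List.drop_eq_nil_of_le (by omega)] at h
      exact List.cons_ne_nil x rest' h.symm
    have hgD : mylist.getD s 0 = x := by
      rw [List.getD_eq_getElem?_getD, pvDrop_getElem? h]; rfl
    rw [PySem.List.enumerate_cons]
    simp only [List.foldl_cons]
    have hinner : pvInnerA mylist (s : Int) (PySem.List.pyRange 0 ((s : Int) + 1) 1)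
        = pvSpanAux x ((mylist.take s).reverse) + 1 := by
      have h' := pvInnerA_eq mylist s hs s 0 (by omega)
      rw [hgD] at h'
      simpa using h'
    have hcast : (s : Int) + 1 = (((s + 1 : Nat)) : Int) := by push_cast; ring
    rw [hinner, hcast, ih (s + 1) _ (pvDrop_succ h), pvTake_succ_reverse h]
    simp only [pvSumSpans]
    ring

theorem pvMatch_succ (s : Int) (S : List Int) :
    (match S with | [] => s + 1 + 1 | t :: _ => s + 1 - t)
      = (match S with | [] => s + 1 | t :: _ => s - t) + 1 := by
  cases S <;> simp
  ring

lemma pvLoopB (mylist : List Int) :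
    ∀ (rest : List Int) (s : Nat) (stack : List Int) (total : Int),
      mylist.drop s = rest →
      (∀ x, (match pvPopWhile mylist x stack with
             | [] => (s : Int) + 1
             | t :: _ => (s : Int) - t) = pvSpanAux x ((mylist.take s).reverse) + 1) →
      ((PySem.List.enumerate rest (s : Int)).foldl
          (fun (st : Int × List Int) p =>
            let S := pvPopWhile mylist p.2 st.2
            (st.1 + (match S with | [] => p.1 + 1 | t :: _ => p.1 - t), p.1 :: S))
          (total, stack)).1
        = total + pvSumSpans ((mylist.take s).reverse) rest := by
  intro rest
  induction rest with
  | nil => intro s stack total h hP; simp [PySem.List.enumerate, pvSumSpans]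
  | cons x rest' ih =>
    intro s stack total h hP
    have hgx : PySem.List.pyGetD mylist (s : Int) 0 = x := by
      have h1 : PySem.List.pyGetD mylist (s : Int) 0 = mylist.getD s 0 := by
        exact_mod_cast PySem.List.pyGetD_natCast mylist s 0
      rw [h1, List.getD_eq_getElem?_getD, pvDrop_getElem? h]; rfl
    rw [PySem.List.enumerate_cons]
    simp only [List.foldl_cons]
    have hcast : (s : Int) + 1 = (((s + 1 : Nat)) : Int) := by push_cast; ring
    have hP' : ∀ x', (match pvPopWhile mylist x' ((s : Int) :: pvPopWhile mylist x stack) with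
             | [] => ((s + 1 : Nat) : Int) + 1
             | t :: _ => ((s + 1 : Nat) : Int) - t)
             = pvSpanAux x' ((mylist.take (s + 1)).reverse) + 1 := by
      intro x'
      rw [pvTake_succ_reverse h]
      by_cases hc : x < x'
      · have hpop : pvPopWhile mylist x' ((s : Int) :: pvPopWhile mylist x stack)
            = pvPopWhile mylist x' stack := by
          simp only [pvPopWhile, hgx, if_pos hc]
          exact pvPop_pop mylist x x' (le_of_lt hc) stack
        rw [hpop]
        simp only [pvSpanAux, if_pos hc]
        push_cast
        rw [pvMatch_succ (s : Int) (pvPopWhile mylist x' stack), hP x']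
        ring
      · have hpop : pvPopWhile mylist x' ((s : Int) :: pvPopWhile mylist x stack)
            = (s : Int) :: pvPopWhile mylist x stack := by
          simp only [pvPopWhile, hgx, if_neg hc]
        rw [hpop]
        simp only [pvSpanAux, if_neg hc]
        push_cast; ring
    have hstep : (match pvPopWhile mylist x stack with
             | [] => (s : Int) + 1
             | t :: _ => (s : Int) - t) = pvSpanAux x ((mylist.take s).reverse) + 1 := hP x
    rw [show PySem.List.enumerate rest' ((s : Int) + 1)
          = PySem.List.enumerate rest' (((s + 1 : Nat)) : Int) from by rw [hcast]]
    rw [ih (s + 1) _ _ (pvDrop_succ h) hP']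
    rw [pvTake_succ_reverse h]
    simp only [pvSumSpans]
    rw [hstep]
    ring

-- ===== VERDICT (by name: the statement is the Claim_ definition above) =====
theorem calculateV_spec : Claim_equal_calculateV := by
  intro mylist _
  unfold Spec_calculateV calculateV calculateV_alt
  have hA := pvLoopA mylist mylist 0 0 rfl
  have hB := pvLoopB mylist mylist 0 ([] : List Int) 0 rfl
    (by intro x; simp [pvPopWhile, pvSpanAux])
  simp only [List.take_zero, List.reverse_nil] at hA hB
  norm_num at hA hB
  rw [show ((0 : Int)) = ((0 : Nat) : Int) by rfl] at hA hB ⊢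
  rw [hA, hB]
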